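-- pv_equiv track=rewrite | github.com/brandonhippe/Advent-of-Code-2018 | python/20.py | printRooms
-- ===== SOURCE A (Python) =====
-- def printRooms(rooms, doors, pos):
--     minX = min(p[0] for p in rooms.union(doors))
--     minY = min(p[1] for p in rooms.union(doors))
--     maxX = max(p[0] for p in rooms.union(doors))
--     maxY = max(p[1] for p in rooms.union(doors))
--
--     string = ''
--     for y in range(minY - 1, maxY + 2):
--         string += '\n'
--         for x in range(minX - 1, maxX + 2):
--             c = '#'
--
--             if (x, y) == pos:
--                 c = '@'
--             elif (x, y) in rooms:
--                 c = ' '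
--             elif (x, y) in doors:
--                 c = '.'
--
--             string += c
--
--     return string[1:]
-- ===== SOURCE B (Python) =====
-- def printRooms(rooms, doors, pos):
--     pts = rooms.union(doors)
--     minX = min(p[0] for p in pts)
--     minY = min(p[1] for p in pts)
--     maxX = max(p[0] for p in pts)
--     maxY = max(p[1] for p in pts)
--     ox, oy = minX - 1, minY - 1
--     width = maxX + 1 - ox + 1
--     height = maxY + 1 - oy + 1
--     grid = [['#'] * width for _ in range(height)]
--
--     def paint(p, c):
--         x, y = p
--         if ox <= x <= maxX + 1 and oy <= y <= maxY + 1: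
--             grid[y - oy][x - ox] = c
--
--     for d in doors:
--         paint(d, '.')
--     for r in rooms:
--         paint(r, ' ')
--     paint(pos, '@')
--     return '\n'.join(''.join(row) for row in grid)
-- ===== Notes on version B (the rewrite author's own statement) =====
-- stated objective: faster
-- what changed: A tests every grid cell against the rooms/doors point sets (a membership scan per cell, O(W*H*n)); B allocates a '#'-filled grid once and paints each door, room and finally the position directly into it (O(W*H + n)), then joins the rows.
-- outside the precondition, e.g. on printRooms(set(), set(), (0, 0)): A raises ValueError, B raises ValueError
import Mathlib
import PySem

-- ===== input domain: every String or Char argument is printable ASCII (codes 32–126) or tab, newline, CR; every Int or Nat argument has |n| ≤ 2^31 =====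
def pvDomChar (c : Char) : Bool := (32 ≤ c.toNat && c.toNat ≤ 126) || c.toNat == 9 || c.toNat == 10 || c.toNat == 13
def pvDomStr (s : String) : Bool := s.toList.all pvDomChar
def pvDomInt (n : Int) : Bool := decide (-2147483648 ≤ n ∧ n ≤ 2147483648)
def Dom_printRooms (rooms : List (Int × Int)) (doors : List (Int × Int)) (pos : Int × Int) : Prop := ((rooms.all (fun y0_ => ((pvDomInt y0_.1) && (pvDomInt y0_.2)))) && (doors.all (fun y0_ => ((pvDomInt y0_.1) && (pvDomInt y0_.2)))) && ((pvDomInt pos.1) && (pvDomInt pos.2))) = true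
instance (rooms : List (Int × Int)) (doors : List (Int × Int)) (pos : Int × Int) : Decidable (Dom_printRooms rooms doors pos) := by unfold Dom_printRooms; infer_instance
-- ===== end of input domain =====

-- B replaces A's per-cell membership scan of the whole map (for every grid cell, test the point sets)
-- by allocating a '#'-filled grid once and painting the door/room/pos points into it, then joining rows.
-- Equivalence of RETURN VALUES is proved on all nonempty inputs (A raises ValueError when rooms ∪ doors = ∅).

-- ===== PORT A =====
def printRooms (rooms : List (Int × Int)) (doors : List (Int × Int)) (pos : Int × Int) : String :=
  match PySem.List.min? ((PySem.Set.ofList (rooms ++ doors)).map Prod.fst) (fun x => x),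
        PySem.List.min? ((PySem.Set.ofList (rooms ++ doors)).map Prod.snd) (fun x => x),
        PySem.List.max? ((PySem.Set.ofList (rooms ++ doors)).map Prod.fst) (fun x => x),
        PySem.List.max? ((PySem.Set.ofList (rooms ++ doors)).map Prod.snd) (fun x => x) with
  | some minX, some minY, some maxX, some maxY =>
    let s := (PySem.List.pyRange (minY - 1) (maxY + 2) 1).foldl (fun s y =>
      (PySem.List.pyRange (minX - 1) (maxX + 2) 1).foldl (fun s x =>
        let c : String :=
          if (x, y) = pos then "@"
          else if (x, y) ∈ rooms then " "
          else if (x, y) ∈ doors then "."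
          else "#"
        s ++ c) (s ++ "\n")) ""
    PySem.Str.slice s (some 1) none
  | _, _, _, _ => ""      -- unreachable under Pre_ (Python raises ValueError on an empty union)

-- ===== PORT B =====
-- grid[y-oy][x-ox] = c, guarded by the bounding box (out-of-box points are left unpainted)
def pvPaint (ox oy mx my : Int) (g : List (List Char)) (p : Int × Int) (c : Char) : List (List Char) :=
  if ox ≤ p.1 ∧ p.1 ≤ mx ∧ oy ≤ p.2 ∧ p.2 ≤ my then
    g.modify (p.2 - oy).toNat (fun row => row.set (p.1 - ox).toNat c)
  else g

def printRooms_alt (rooms : List (Int × Int)) (doors : List (Int × Int)) (pos : Int × Int) : String :=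
  match PySem.List.min? ((PySem.Set.ofList (rooms ++ doors)).map Prod.fst) (fun x => x) with
  | none => ""      -- unreachable under Pre_ (Python raises ValueError on an empty union)
  | some minX =>
  match PySem.List.min? ((PySem.Set.ofList (rooms ++ doors)).map Prod.snd) (fun x => x) with
  | none => ""
  | some minY =>
  match PySem.List.max? ((PySem.Set.ofList (rooms ++ doors)).map Prod.fst) (fun x => x) with
  | none => ""
  | some maxX =>
  match PySem.List.max? ((PySem.Set.ofList (rooms ++ doors)).map Prod.snd) (fun x => x) with
  | none => ""
  | some maxY =>
    let ox := minX - 1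
    let oy := minY - 1
    let width := (maxX + 1 - ox + 1).toNat
    let height := (maxY + 1 - oy + 1).toNat
    let g0 : List (List Char) := List.replicate height (List.replicate width '#')
    let g1 := doors.foldl (fun g d => pvPaint ox oy (maxX + 1) (maxY + 1) g d '.') g0
    let g2 := rooms.foldl (fun g r => pvPaint ox oy (maxX + 1) (maxY + 1) g r ' ') g1
    let g3 := pvPaint ox oy (maxX + 1) (maxY + 1) g2 pos '@'
    PySem.Str.join "\n" (g3.map (fun row => String.ofList row))

-- ===== PRECONDITION & SPEC =====
-- Pre_ excludes only rooms = doors = [] : there Python's min() raises ValueError (both in A and in B).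
def Pre_printRooms (rooms : List (Int × Int)) (doors : List (Int × Int)) (pos : Int × Int) : Prop :=
  rooms ++ doors ≠ []
instance (rooms : List (Int × Int)) (doors : List (Int × Int)) (pos : Int × Int) : Decidable (Pre_printRooms rooms doors pos) := by unfold Pre_printRooms; infer_instance
def pvWitness_printRooms : (List (Int × Int)) × (List (Int × Int)) × (Int × Int) := ([(0, 0)], [(1, 0)], (0, 0))
def Spec_printRooms (rooms : List (Int × Int)) (doors : List (Int × Int)) (pos : Int × Int) (out : String) : Prop := out = printRooms_alt rooms doors pos
instance (rooms : List (Int × Int)) (doors : List (Int × Int)) (pos : Int × Int) (out : String) : Decidable (Spec_printRooms rooms doors pos out) := by unfold Spec_printRooms; infer_instance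

-- ===== CLAIM (what is proved, stated in full; the proofs are below) =====
def Claim_equal_printRooms : Prop := ∀ (rooms : List (Int × Int)) (doors : List (Int × Int)) (pos : Int × Int), Dom_printRooms rooms doors pos → Pre_printRooms rooms doors pos → Spec_printRooms rooms doors pos (printRooms rooms doors pos)

-- ===== LEMMAS AND PROOFS =====

-- the character A prints at (x, y)
def pvCellC (rooms doors : List (Int × Int)) (pos : Int × Int) (x y : Int) : Char :=
  if (x, y) = pos then '@'
  else if (x, y) ∈ rooms then ' '
  else if (x, y) ∈ doors then '.'
  else '#'

-- grid cell access (total; used only at valid indices)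
def pvCell (g : List (List Char)) (j i : Nat) : Char := ((g[j]?.getD [])[i]?.getD '#')

theorem pvPaint_length (ox oy mx my : Int) (g : List (List Char)) (p : Int × Int) (c : Char) :
    (pvPaint ox oy mx my g p c).length = g.length := by
  unfold pvPaint; split <;> simp

theorem pvPaint_rowlen (ox oy mx my : Int) (g : List (List Char)) (p : Int × Int) (c : Char) (j : Nat) :
    ((pvPaint ox oy mx my g p c)[j]?.getD []).length = (g[j]?.getD []).length := by
  unfold pvPaint; split
  · rw [List.getElem?_modify]
    cases g[j]? with
    | none => rfl
    | some row => simp only [Option.map_some, Option.getD_some]; split <;> simp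
  · rfl

theorem pvPaint_cell (ox oy mx my : Int) (g : List (List Char)) (p : Int × Int) (c : Char)
    (i j : Nat) (hx : (i : Int) ≤ mx - ox) (hy : (j : Int) ≤ my - oy)
    (hj : j < g.length) (hi : i < (g[j]?.getD []).length) :
    pvCell (pvPaint ox oy mx my g p c) j i =
      if p = (ox + i, oy + j) then c else pvCell g j i := by
  unfold pvPaint pvCell
  split
  · rename_i hg
    rw [List.getElem?_modify]
    rcases hrow : g[j]? with _ | row
    · simp [List.getElem?_eq_none_iff] at hrow; omega
    · by_cases hjj : (p.2 - oy).toNat = j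
      · simp only [hjj, if_pos rfl, Option.map_some]
        by_cases hii : (p.1 - ox).toNat = i
        · have hilen : i < row.length := by rw [hrow] at hi; simpa using hi
          have hp : p = (ox + ↑i, oy + ↑j) := by
            obtain ⟨x, y⟩ := p; dsimp at hg hjj hii ⊢
            simp only [Prod.mk.injEq]; omega
          simp [hii, hp, List.getElem?_set, hilen]
        · have hp : p ≠ (ox + i, oy + j) := by
            obtain ⟨x, y⟩ := p; dsimp at hg hii ⊢; intro h; injection h with h1 h2; omega
          simp [List.getElem?_set, hii, hp, hrow]
      · have hp : p ≠ (ox + i, oy + j) := by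
          obtain ⟨x, y⟩ := p; dsimp at hg hjj ⊢; intro h; injection h with h1 h2; omega
        simp [hjj, hp, hrow]
  · rename_i hg
    have hp : p ≠ (ox + i, oy + j) := by
      obtain ⟨x, y⟩ := p; intro h; injection h with h1 h2; apply hg; dsimp; omega
    simp [hp]

theorem pvPaint_foldl_length (ox oy mx my : Int) (c : Char) (pts : List (Int × Int))
    (g : List (List Char)) :
    (pts.foldl (fun g q => pvPaint ox oy mx my g q c) g).length = g.length := by
  induction pts generalizing g with
  | nil => rfl
  | cons p t ih => rw [List.foldl_cons, ih, pvPaint_length]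

theorem pvPaint_foldl_rowlen (ox oy mx my : Int) (c : Char) (pts : List (Int × Int))
    (g : List (List Char)) (j : Nat) :
    ((pts.foldl (fun g q => pvPaint ox oy mx my g q c) g)[j]?.getD []).length
      = (g[j]?.getD []).length := by
  induction pts generalizing g with
  | nil => rfl
  | cons p t ih => rw [List.foldl_cons, ih, pvPaint_rowlen]

theorem pvPaint_foldl_cell (ox oy mx my : Int) (c : Char) (pts : List (Int × Int))
    (g : List (List Char)) (i j : Nat)
    (hx : (i : Int) ≤ mx - ox) (hy : (j : Int) ≤ my - oy)
    (hj : j < g.length) (hi : i < (g[j]?.getD []).length) :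
    pvCell (pts.foldl (fun g q => pvPaint ox oy mx my g q c) g) j i =
      if (ox + i, oy + j) ∈ pts then c else pvCell g j i := by
  induction pts generalizing g with
  | nil => simp
  | cons p t ih =>
    rw [List.foldl_cons, ih _ (by rw [pvPaint_length]; exact hj) (by rw [pvPaint_rowlen]; exact hi),
        pvPaint_cell ox oy mx my g p c i j hx hy hj hi]
    by_cases h1 : (ox + i, oy + j) ∈ t
    · simp [h1]
    · by_cases h2 : p = (ox + i, oy + j) <;> simp [h1, h2, eq_comm]

theorem pvInner_toList (rooms doors : List (Int × Int)) (pos : Int × Int) (y : Int)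
    (xs : List Int) (s : String) :
    (xs.foldl (fun s x =>
        s ++ (if (x, y) = pos then "@"
          else if (x, y) ∈ rooms then " "
          else if (x, y) ∈ doors then "."
          else "#")) s).toList
      = s.toList ++ xs.map (fun x => pvCellC rooms doors pos x y) := by
  induction xs generalizing s with
  | nil => simp
  | cons x t ih =>
    rw [List.foldl_cons, ih, List.map_cons]
    simp only [String.toList_append, List.append_assoc, List.singleton_append]
    congr 1
    unfold pvCellC
    split_ifs <;> rfl

theorem pvOuter_toList (rooms doors : List (Int × Int)) (pos : Int × Int)
    (xs : List Int) (ys : List Int) (s : String) :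
    (ys.foldl (fun s y =>
        xs.foldl (fun s x =>
          s ++ (if (x, y) = pos then "@"
            else if (x, y) ∈ rooms then " "
            else if (x, y) ∈ doors then "."
            else "#")) (s ++ "\n")) s).toList
      = s.toList ++ (ys.map (fun y => '\n' :: xs.map (fun x => pvCellC rooms doors pos x y))).flatten := by
  induction ys generalizing s with
  | nil => simp
  | cons y t ih =>
    rw [List.foldl_cons, ih, List.map_cons, List.flatten_cons]
    simp [pvInner_toList]

theorem pvJoin_eq_flatten_drop (rs : List (List Char)) (r : List Char) :
    PySem.Chars.join ['\n'] (r :: rs) = (((r :: rs).map (fun q => '\n' :: q)).flatten).drop 1 := by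
  induction rs generalizing r with
  | nil => simp [PySem.Chars.join_singleton]
  | cons q t ih =>
    rw [PySem.Chars.join_cons_cons, ih q]
    simp


theorem pvRows_eq (rooms doors : List (Int × Int)) (pos : Int × Int) (minX minY maxX maxY : Int)
    (hXX : minX ≤ maxX) (hYY : minY ≤ maxY) :
    pvPaint (minX - 1) (minY - 1) (maxX + 1) (maxY + 1)
        (List.foldl (fun g r => pvPaint (minX - 1) (minY - 1) (maxX + 1) (maxY + 1) g r ' ')
          (List.foldl (fun g d => pvPaint (minX - 1) (minY - 1) (maxX + 1) (maxY + 1) g d '.')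
            (List.replicate (maxY + 1 - (minY - 1) + 1).toNat
              (List.replicate (maxX + 1 - (minX - 1) + 1).toNat '#'))
            doors)
          rooms)
        pos '@'
      = (PySem.List.pyRange (minY - 1) (maxY + 2)).map (fun y =>
          (PySem.List.pyRange (minX - 1) (maxX + 2)).map (fun x => pvCellC rooms doors pos x y)) := by
  set W := (maxX + 1 - (minX - 1) + 1).toNat with hW
  set H := (maxY + 1 - (minY - 1) + 1).toNat with hH
  set G0 := List.replicate H (List.replicate W '#') with hG0
  set G1 := List.foldl (fun g d => pvPaint (minX - 1) (minY - 1) (maxX + 1) (maxY + 1) g d '.') G0 doors with hG1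
  set G2 := List.foldl (fun g r => pvPaint (minX - 1) (minY - 1) (maxX + 1) (maxY + 1) g r ' ') G1 rooms with hG2
  have hL1 : G1.length = H := by rw [hG1, pvPaint_foldl_length, hG0, List.length_replicate]
  have hL2 : G2.length = H := by rw [hG2, pvPaint_foldl_length, hL1]
  have hL3 : (pvPaint (minX - 1) (minY - 1) (maxX + 1) (maxY + 1) G2 pos '@').length = H := by
    rw [pvPaint_length, hL2]
  apply List.ext_getElem
  · rw [hL3, List.length_map, PySem.List.length_pyRange_one]; omega
  · intro j h1 h2
    have hjH : j < H := by rw [← hL3]; exact h1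
    have hR0 : (G0[j]?.getD []).length = W := by
      rw [hG0]; simp [List.getElem?_replicate, hjH]
    have hR1 : (G1[j]?.getD []).length = W := by rw [hG1, pvPaint_foldl_rowlen, hR0]
    have hR2 : (G2[j]?.getD []).length = W := by rw [hG2, pvPaint_foldl_rowlen, hR1]
    have hR3 : ((pvPaint (minX - 1) (minY - 1) (maxX + 1) (maxY + 1) G2 pos '@')[j]?.getD []).length = W := by
      rw [pvPaint_rowlen, hR2]
    rw [List.getElem_map, PySem.List.getElem_pyRange_one]
    have hjlen : (pvPaint (minX - 1) (minY - 1) (maxX + 1) (maxY + 1) G2 pos '@')[j].length = W := by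
      have h := List.getElem?_eq_getElem h1
      rw [h] at hR3; simpa using hR3
    apply List.ext_getElem
    · rw [List.length_map, PySem.List.length_pyRange_one, hjlen]; omega
    · intro i hi1 hi2
      have hiW : i < W := by rw [← hjlen]; exact hi1
      have hx : (i : Int) ≤ (maxX + 1) - (minX - 1) := by omega
      have hy : (j : Int) ≤ (maxY + 1) - (minY - 1) := by omega
      have hcell : (pvPaint (minX - 1) (minY - 1) (maxX + 1) (maxY + 1) G2 pos '@')[j][i]
          = pvCell (pvPaint (minX - 1) (minY - 1) (maxX + 1) (maxY + 1) G2 pos '@') j i := by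
        unfold pvCell
        rw [List.getElem?_eq_getElem h1, Option.getD_some, List.getElem?_eq_getElem hi1, Option.getD_some]
      rw [hcell]
      rw [pvPaint_cell _ _ _ _ _ _ _ i j hx hy (by rw [hL2]; exact hjH) (by rw [hR2]; exact hiW)]
      rw [hG2, pvPaint_foldl_cell _ _ _ _ _ _ _ i j hx hy (by rw [hL1]; exact hjH) (by rw [hR1]; exact hiW)]
      rw [hG1, pvPaint_foldl_cell _ _ _ _ _ _ _ i j hx hy (by rw [hG0, List.length_replicate]; exact hjH) (by rw [hR0]; exact hiW)]
      have hc0 : pvCell G0 j i = '#' := by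
        rw [hG0]; unfold pvCell; simp [List.getElem?_replicate, hjH, hiW]
      rw [hc0, List.getElem_map, PySem.List.getElem_pyRange_one]
      unfold pvCellC
      by_cases hp : pos = (minX - 1 + ↑i, minY - 1 + ↑j)
      · simp [hp]
      · have hp' : (minX - 1 + ↑i, minY - 1 + ↑j) ≠ pos := fun h => hp h.symm
        simp only [if_neg hp, if_neg hp']

-- ===== VERDICT (by name: the statement is the Claim_ definition above) =====
theorem printRooms_spec : Claim_equal_printRooms := by
  intro rooms doors pos _ hpre
  obtain ⟨q, hq⟩ := List.exists_mem_of_ne_nil _ hpre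
  have hqm : q ∈ PySem.Set.ofList (rooms ++ doors) := (PySem.Set.mem_ofList _ _).mpr hq
  have hne1 : (PySem.Set.ofList (rooms ++ doors)).map Prod.fst ≠ [] := by
    intro h; rw [List.map_eq_nil_iff] at h; simp [h] at hqm
  have hne2 : (PySem.Set.ofList (rooms ++ doors)).map Prod.snd ≠ [] := by
    intro h; rw [List.map_eq_nil_iff] at h; simp [h] at hqm
  obtain ⟨minX, hminX⟩ : ∃ v, PySem.List.min? ((PySem.Set.ofList (rooms ++ doors)).map Prod.fst) (fun x => x) = some v := by
    rcases h : PySem.List.min? ((PySem.Set.ofList (rooms ++ doors)).map Prod.fst) (fun x => x) with _ | v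
    · rw [PySem.List.min?_eq_none_iff] at h; exact absurd h hne1
    · exact ⟨v, rfl⟩
  obtain ⟨minY, hminY⟩ : ∃ v, PySem.List.min? ((PySem.Set.ofList (rooms ++ doors)).map Prod.snd) (fun x => x) = some v := by
    rcases h : PySem.List.min? ((PySem.Set.ofList (rooms ++ doors)).map Prod.snd) (fun x => x) with _ | v
    · rw [PySem.List.min?_eq_none_iff] at h; exact absurd h hne2
    · exact ⟨v, rfl⟩
  obtain ⟨maxX, hmaxX⟩ : ∃ v, PySem.List.max? ((PySem.Set.ofList (rooms ++ doors)).map Prod.fst) (fun x => x) = some v := by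
    rcases h : PySem.List.max? ((PySem.Set.ofList (rooms ++ doors)).map Prod.fst) (fun x => x) with _ | v
    · rw [PySem.List.max?_eq_none_iff] at h; exact absurd h hne1
    · exact ⟨v, rfl⟩
  obtain ⟨maxY, hmaxY⟩ : ∃ v, PySem.List.max? ((PySem.Set.ofList (rooms ++ doors)).map Prod.snd) (fun x => x) = some v := by
    rcases h : PySem.List.max? ((PySem.Set.ofList (rooms ++ doors)).map Prod.snd) (fun x => x) with _ | v
    · rw [PySem.List.max?_eq_none_iff] at h; exact absurd h hne2
    · exact ⟨v, rfl⟩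
  have hXX : minX ≤ maxX := by
    have h1 := PySem.List.min?_isMin hminX q.1 (List.mem_map_of_mem hqm)
    have h2 := PySem.List.max?_isMax hmaxX q.1 (List.mem_map_of_mem hqm)
    exact le_trans h1 h2
  have hYY : minY ≤ maxY := by
    have h1 := PySem.List.min?_isMin hminY q.2 (List.mem_map_of_mem hqm)
    have h2 := PySem.List.max?_isMax hmaxY q.2 (List.mem_map_of_mem hqm)
    exact le_trans h1 h2
  unfold Spec_printRooms printRooms printRooms_alt
  simp only [hminX, hminY, hmaxX, hmaxY]
  rw [← String.toList_inj, PySem.Str.toList_slice, PySem.Str.toList_join]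
  rw [pvOuter_toList rooms doors pos (PySem.List.pyRange (minX - 1) (maxX + 2)) (PySem.List.pyRange (minY - 1) (maxY + 2)) ""]
  rw [pvRows_eq rooms doors pos minX minY maxX maxY hXX hYY]
  simp only [String.toList_empty, List.nil_append, List.map_map, Function.comp_def,
    String.toList_ofList]
  have hsep : ("
" : String).toList = ['
'] := by simp
  rw [hsep]
  have hnil : (PySem.List.pyRange (minY - 1) (maxY + 2)).map
      (fun y => (PySem.List.pyRange (minX - 1) (maxX + 2)).map (fun x => pvCellC rooms doors pos x y)) ≠ [] := by
    intro h
    have := congrArg List.length h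
    simp only [List.length_map, PySem.List.length_pyRange_one, List.length_nil] at this
    omega
  obtain ⟨r, rt, hrr⟩ := List.exists_cons_of_ne_nil hnil
  rw [show (fun y => '
' :: List.map (fun x => pvCellC rooms doors pos x y) (PySem.List.pyRange (minX - 1) (maxX + 2)))
        = ((fun q => '
' :: q) ∘ fun y => List.map (fun x => pvCellC rooms doors pos x y) (PySem.List.pyRange (minX - 1) (maxX + 2))) from rfl,
      ← List.map_map]
  rw [hrr, pvJoin_eq_flatten_drop]
  exact PySem.List.slice_from _ (by norm_num)
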